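-- pv_equiv track=rewrite | github.com/phil-huynh/Problem-Sets | python/SJP_problem_set/lists/bored_castaway.py | tide_difference
-- ===== SOURCE A (Python) =====
-- def tide_difference(measurements):
--     low = min(measurements)
--     high = max(measurements)
--     i = measurements.index(low)
--     j = measurements.index(high)
--     if i > j:
--         return None
--     nums = measurements[i:j]
--     for i, num in enumerate(nums):
--         if i == len(nums) - 1:
--             break
--         if num > nums[i + 1]:
--             return None
--     return high - low
-- ===== SOURCE B (Python) =====
-- def tide_difference(measurements):
--     low = min(measurements)
--     high = max(measurements)
--     i = measurements.index(low)
--     j = measurements.index(high)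
--     if i > j:
--         return None
--     nums = measurements[i:j]
--     if nums != sorted(nums):
--         return None
--     return high - low
-- ===== Notes on version B (the rewrite author's own statement) =====
-- stated objective: idiomatic
-- what changed: A's adjacent-pair loop over enumerate(nums) is replaced by a single monotonicity test comparing the slice with its sorted copy (nums != sorted(nums)).
import Mathlib
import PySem

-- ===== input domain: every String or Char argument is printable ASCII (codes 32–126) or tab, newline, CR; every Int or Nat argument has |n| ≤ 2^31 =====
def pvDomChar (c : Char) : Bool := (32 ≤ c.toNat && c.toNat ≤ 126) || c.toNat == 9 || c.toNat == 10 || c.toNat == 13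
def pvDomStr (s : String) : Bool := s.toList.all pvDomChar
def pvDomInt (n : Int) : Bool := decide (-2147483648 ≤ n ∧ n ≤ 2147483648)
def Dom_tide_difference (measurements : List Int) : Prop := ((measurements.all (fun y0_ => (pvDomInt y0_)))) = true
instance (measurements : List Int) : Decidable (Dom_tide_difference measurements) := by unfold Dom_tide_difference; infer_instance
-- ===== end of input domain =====

-- B replaces A's adjacent-pair loop over enumerate(nums) by comparing the slice with its
-- sorted copy; equivalence of the two monotonicity tests is proved on all non-empty inputs.

-- ===== PORT A =====
-- the 'for i, num in enumerate(nums)' loop of A: break at the last index, else compare with nums[i+1]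
def tideLoopA (nums : List Int) (pairs : List (Int × Int)) (res : Int) : Option Int :=
  match pairs with
  | [] => some res
  | (i, num) :: rest =>
    if i = (nums.length : Int) - 1 then some res
    else
      match PySem.List.pyGet? nums (i + 1) with
      | none => none          -- IndexError (unreachable: i+1 is in range whenever this branch runs)
      | some nxt => if num > nxt then none else tideLoopA nums rest res

def tide_difference (measurements : List Int) : Option Int :=
  match PySem.List.min? measurements (fun x => x), PySem.List.max? measurements (fun x => x) with
  | some low, some high =>
    match PySem.List.index? measurements low, PySem.List.index? measurements high with
    | some i, some j =>
      if i > j then none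
      else
        let nums := PySem.List.slice measurements (some (i : Int)) (some (j : Int))
        tideLoopA nums (PySem.List.enumerate nums) (high - low)
    | _, _ => none            -- unreachable: min/max are members
  | _, _ => none              -- ValueError on empty input (excluded by Pre_)

-- ===== PORT B =====
def tide_difference_alt (measurements : List Int) : Option Int :=
  match PySem.List.min? measurements (fun x => x) with
  | none => none          -- ValueError on empty input (excluded by Pre_)
  | some low =>
    match PySem.List.max? measurements (fun x => x) with
    | none => none
    | some high =>
      match PySem.List.index? measurements low with
      | none => none      -- unreachable: low ∈ measurements
      | some i =>
        match PySem.List.index? measurements high with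
        | none => none    -- unreachable: high ∈ measurements
        | some j =>
          if i > j then none
          else
            let nums := PySem.List.slice measurements (some (i : Int)) (some (j : Int))
            if nums ≠ PySem.List.sorted nums (fun x => x) false then none
            else some (high - low)

-- ===== PRECONDITION & SPEC =====
-- A raises ValueError (min of an empty sequence) on the empty list, so Pre_ excludes only the empty list.
def Pre_tide_difference (measurements : List Int) : Prop := measurements ≠ []
instance (measurements : List Int) : Decidable (Pre_tide_difference measurements) := by
  unfold Pre_tide_difference; infer_instance

def pvWitness_tide_difference : List Int := [3, 1, 2, 5]

def Spec_tide_difference (measurements : List Int) (out : Option Int) : Prop := out = tide_difference_alt measurements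
instance (measurements : List Int) (out : Option Int) : Decidable (Spec_tide_difference measurements out) := by unfold Spec_tide_difference; infer_instance

-- ===== CLAIM (what is proved, stated in full; the proofs are below) =====
def Claim_equal_tide_difference : Prop := ∀ (measurements : List Int), Dom_tide_difference measurements → Pre_tide_difference measurements → Spec_tide_difference measurements (tide_difference measurements)

-- ===== LEMMAS AND PROOFS =====

-- A's loop over enumerate(nums.drop k, start := k) is a monotonicity test of nums.drop k
theorem tideLoopA_drop (nums : List Int) :
    ∀ (l : List Int) (k : Nat) (res : Int), nums.drop k = l →
      tideLoopA nums (PySem.List.enumerate l k) res =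
        if l.IsChain (· ≤ ·) then some res else none := by
  intro l
  induction l with
  | nil => intro k res h; simp [PySem.List.enumerate, tideLoopA]
  | cons x rest ih =>
    intro k res h
    have hk : k < nums.length := by
      by_contra hk
      simp [List.drop_eq_nil_of_le (Nat.le_of_not_lt hk)] at h
    have hlen : nums.length - k = rest.length + 1 := by
      have := congrArg List.length h
      simpa [List.length_drop] using this
    rw [PySem.List.enumerate_cons]
    show tideLoopA nums ((↑k, x) :: PySem.List.enumerate rest (↑k + 1)) res = _
    unfold tideLoopA
    by_cases hlast : (k : Int) = (nums.length : Int) - 1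
    · -- last index: rest = []
      have hr : rest = [] := by
        have h1 : nums.length = k + 1 := by omega
        have h2 : rest.length = 0 := by omega
        exact List.eq_nil_of_length_eq_zero h2
      simp [hlast, hr]
    · -- rest nonempty
      have hrest : nums.drop (k + 1) = rest := by
        have : nums.drop (k + 1) = (nums.drop k).drop 1 := by
          rw [List.drop_drop]
        simp [this, h]
      have hrne : rest ≠ [] := by
        intro hr
        apply hlast
        rw [hr] at hlen
        simp only [List.length_nil] at hlen
        omega
      obtain ⟨y, rest', hy⟩ := List.exists_cons_of_ne_nil hrne
      have hk1 : k + 1 < nums.length := by omega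
      have hget : PySem.List.pyGet? nums ((k : Int) + 1) = some y := by
        have : ((k : Int) + 1) = ((k + 1 : Nat) : Int) := by push_cast; ring
        rw [this, PySem.List.pyGet?_natCast]
        have : nums[k + 1]? = (nums.drop (k+1)).head? := by
          rw [List.head?_drop]
        rw [this, hrest, hy]
        rfl
      have hnum : (PySem.List.enumerate rest (↑k + 1) : List (Int × Int)) =
          PySem.List.enumerate rest ((k + 1 : Nat) : Int) := by push_cast; ring_nf
      simp only [hlast, if_false, hget]
      by_cases hxy : x > y
      · simp [hxy, hy, List.isChain_cons_cons, not_le.mpr hxy]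
      · have hle : x ≤ y := not_lt.mp hxy
        simp only [hxy, if_false, if_neg hxy]
        rw [hnum, ih (k + 1) res hrest]
        rw [hy]
        simp [List.isChain_cons_cons, hle]

theorem tideLoopA_eq (nums : List Int) (res : Int) :
    tideLoopA nums (PySem.List.enumerate nums) res =
      if nums.IsChain (· ≤ ·) then some res else none := by
  have := tideLoopA_drop nums nums 0 res (by simp)
  simpa [PySem.List.enumerate] using this

theorem sorted_eq_iff_chain (nums : List Int) :
    (nums = PySem.List.sorted nums (fun x => x) false) ↔ nums.IsChain (· ≤ ·) := by
  rw [List.isChain_iff_pairwise]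
  constructor
  · intro h
    have := PySem.List.sorted_pairwise nums (fun x => x) (κ := Int)
    rw [← h] at this
    simpa using this
  · intro h
    exact (PySem.List.sorted_eq_self_of_pairwise nums (fun x => x) (by simpa using h)).symm

-- ===== VERDICT (by name: the statement is the Claim_ definition above) =====
theorem tide_difference_spec : Claim_equal_tide_difference := by
  intro ms _ _
  unfold Spec_tide_difference tide_difference tide_difference_alt
  cases hmin : PySem.List.min? ms (fun x => x) with
  | none => rfl
  | some low =>
  cases hmax : PySem.List.max? ms (fun x => x) with
  | none => rfl
  | some high =>
  simp only [PySem.List.index?_eq_idxOf?]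
  cases hi : List.idxOf? low ms with
  | none => simp [hi]
  | some i =>
  cases hj : List.idxOf? high ms with
  | none => simp [hi, hj]
  | some j =>
  simp only [hi, hj]
  by_cases hij : i > j
  · simp [hij]
  · simp only [hij, if_false]
    rw [tideLoopA_eq]
    by_cases hc : (PySem.List.slice ms (some (i : Int)) (some (j : Int))).IsChain (· ≤ ·)
    · simp [hc, ((sorted_eq_iff_chain _).mpr hc).symm]
    · have hne : PySem.List.slice ms (some (i : Int)) (some (j : Int)) ≠
          PySem.List.sorted (PySem.List.slice ms (some (i : Int)) (some (j : Int))) (fun x => x) false := by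
        intro h; exact hc ((sorted_eq_iff_chain _).mp h)
      simp [hc, hne]
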